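-- pv_equiv track=rewrite | github.com/jes9401/algorithm_study | programmers/pro_test36.py | solution
-- ===== SOURCE A (Python) =====
-- def solution(n, words):
--     user_num = 1
--     turn = 1
--     used_words = [words[0]]
--     last_alphabet = words[0][-1]
--     for i in range(len(words)):
--         if i != 0:
--             first_alphabet = words[i][0]
--             if last_alphabet != first_alphabet:
--                 return [user_num, turn]
--             if words[i] not in used_words:
--                 used_words.append(words[i])
--                 last_alphabet = words[i][-1]
--             else:
--                 return [user_num, turn]
--         if n == user_num:
--             user_num = 1
--             turn += 1
--         else:
--             user_num += 1
--     return [0, 0]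
-- ===== SOURCE B (Python) =====
-- def solution(n, words):
--     m = len(words)
--     # staged passes: independently collect chain-break indices and repeat indices;
--     # the game fails at the smallest candidate index.
--     breaks = [i for i in range(1, m) if words[i][0] != words[i - 1][-1]]
--     first_at = {}
--     dups = []
--     for i, w in enumerate(words):
--         if w in first_at:
--             dups.append(i)
--         else:
--             first_at[w] = i
--     candidates = breaks + dups
--     if not candidates:
--         return [0, 0]
--     k = min(candidates)
--     # replay the turn bookkeeping for the k completed turns to name player and turn
--     player = 1
--     turn = 1
--     for _ in range(k):
--         if n == player:
--             player = 1
--             turn += 1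
--         else:
--             player += 1
--     return [player, turn]
-- ===== Notes on version B (the rewrite author's own statement) =====
-- stated objective: alternative
-- what changed: B replaces A's single stateful scan with early return (running last letter, growing used-word list with O(i) membership scans, wraparound counters) by staged passes: a comprehension collecting ALL chain-break indices, a dict pass collecting ALL repeated-word indices, a min over the candidates, and a replay of only the turn bookkeeping for that many turns.
-- outside the precondition, e.g. on solution(2, ['ab', 'ca', '']): A returns [2, 1], B raises IndexError
import Mathlib
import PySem

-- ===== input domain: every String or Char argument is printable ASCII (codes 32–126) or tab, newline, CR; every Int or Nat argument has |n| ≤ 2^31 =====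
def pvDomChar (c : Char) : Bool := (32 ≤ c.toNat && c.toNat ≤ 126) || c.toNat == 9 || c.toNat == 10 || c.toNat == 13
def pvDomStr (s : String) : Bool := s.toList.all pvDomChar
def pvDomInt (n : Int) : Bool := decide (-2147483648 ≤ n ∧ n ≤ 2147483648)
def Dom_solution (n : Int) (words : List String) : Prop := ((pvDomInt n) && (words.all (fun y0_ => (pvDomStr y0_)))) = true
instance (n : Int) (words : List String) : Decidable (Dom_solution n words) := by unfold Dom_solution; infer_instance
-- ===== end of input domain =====

-- B replaces A's single stateful scan with early return by staged passes: collect all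
-- chain-break indices and all repeated-word indices (first-occurrence dict), take the minimum
-- candidate, then replay only the turn bookkeeping for that many turns (objective: alternative).

-- ===== PORT A =====
-- loop 'for i in range(len(words))' of A, state (user_num, turn, used_words, last_alphabet);
-- a 'none' from pyGet? is a Python IndexError (empty string), excluded by Pre_: the port returns [] there.
def solutionLoop (n : Int) (words : List String) (i : Nat)
    (user_num turn : Int) (used : List String) (last : Char) : List Int :=
  if h : i < words.length then
    if i ≠ 0 then
      match PySem.Str.pyGet? words[i] 0 with
      | none => []
      | some first =>
        if last ≠ first then [user_num, turn]
        else if ¬ used.contains words[i] then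
          match PySem.Str.pyGet? words[i] (-1) with
          | none => []
          | some l =>
            if n = user_num then solutionLoop n words (i+1) 1 (turn+1) (used ++ [words[i]]) l
            else solutionLoop n words (i+1) (user_num+1) turn (used ++ [words[i]]) l
        else [user_num, turn]
    else
      if n = user_num then solutionLoop n words (i+1) 1 (turn+1) used last
      else solutionLoop n words (i+1) (user_num+1) turn used last
  else [0, 0]
termination_by words.length - i

def solution (n : Int) (words : List String) : List Int :=
  match words with
  | [] => []  -- words[0] raises IndexError (outside Pre_)
  | w0 :: _ =>
    match PySem.Str.pyGet? w0 (-1) with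
    | none => []  -- words[0][-1] raises IndexError (outside Pre_)
    | some last => solutionLoop n words 0 1 1 [w0] last

-- ===== PORT B =====
-- filter condition of B's comprehension 'words[i][0] != words[i-1][-1]';
-- a 'none' from pyGet? is Python's IndexError on an empty word, excluded by Pre_.
def altBreakCond (words : List String) (i : Int) : Bool :=
  match PySem.Str.pyGet? (PySem.List.pyGetD words i "") 0,
        PySem.Str.pyGet? (PySem.List.pyGetD words (i-1) "") (-1) with
  | some a, some b => a != b
  | _, _ => false

def solution_alt (n : Int) (words : List String) : List Int :=
  let m : Int := (words.length : Int)
  let breaks : List Int := (PySem.List.pyRange 1 m 1).filter (altBreakCond words)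
  -- 'for i, w in enumerate(words): if w in first_at: dups.append(i) else: first_at[w] = i'
  let st := (PySem.List.enumerate words).foldl
    (fun (st : PySem.Dict String Int × List Int) p =>
      if st.1.contains p.2 then (st.1, st.2 ++ [p.1]) else (st.1.insert p.2 p.1, st.2))
    (PySem.Dict.empty, [])
  let candidates := breaks ++ st.2
  if candidates = [] then [0, 0]
  else
    match PySem.List.min? candidates (fun x => x) with
    | some k =>
      -- 'for _ in range(k): if n == player: player, turn = 1, turn + 1 else: player += 1'
      let pt := (PySem.List.pyRange 0 k 1).foldl
        (fun (pt : Int × Int) _ => if n = pt.1 then (1, pt.2 + 1) else (pt.1 + 1, pt.2))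
        (1, 1)
      [pt.1, pt.2]
    | none => [0, 0]  -- unreachable: candidates ≠ []

-- ===== PRECONDITION & SPEC =====
-- Pre_ excludes the lists containing an empty word (and []): A raises IndexError when such a
-- word (or []) is reached before the game fails, and B's whole-list comprehension raises on ANY
-- empty word, even one A never reaches because the game fails earlier — on those inputs A still
-- returns; they are excluded here and cited in the claim. n is unrestricted.
def Pre_solution (n : Int) (words : List String) : Prop :=
  words ≠ [] ∧ ∀ w ∈ words, w ≠ ""
instance (n : Int) (words : List String) : Decidable (Pre_solution n words) := by
  unfold Pre_solution; infer_instance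

def pvWitness_solution : Int × List String := (2, ["ab", "ba", "ac"])

def Spec_solution (n : Int) (words : List String) (out : List Int) : Prop := out = solution_alt n words
instance (n : Int) (words : List String) (out : List Int) : Decidable (Spec_solution n words out) := by unfold Spec_solution; infer_instance

-- ===== CLAIM (what is proved, stated in full; the proofs are below) =====
def Claim_equal_solution : Prop := ∀ (n : Int) (words : List String), Dom_solution n words → Pre_solution n words → Spec_solution n words (solution n words)

-- ===== LEMMAS AND PROOFS =====

-- the word-chain game fails at index k (k ≥ 1): chain break or repeated word
def failAt (words : List String) (k : Nat) : Bool :=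
  (match (words.getD k "").toList.head?, (words.getD (k-1) "").toList.getLast? with
   | some a, some b => a != b
   | _, _ => false)
  || (words.take k).contains (words.getD k "")

-- first failing index ≥ i, the reference both programs are reduced to
def findFail (words : List String) (i : Nat) : Option Nat :=
  if _h : i < words.length then
    if failAt words i then some i else findFail words (i+1)
  else none
termination_by words.length - i

lemma findFail_eq_some (words : List String) :
    ∀ (c i K : Nat), words.length ≤ i + c → findFail words i = some K →
      i ≤ K ∧ K < words.length ∧ failAt words K = true ∧
        ∀ j, i ≤ j → j < K → failAt words j = false := by
  intro c
  induction c with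
  | zero =>
    intro i K hc hf
    rw [findFail, dif_neg (by omega)] at hf
    simp at hf
  | succ c ih =>
    intro i K hc hf
    rw [findFail] at hf
    by_cases h : i < words.length
    · rw [dif_pos h] at hf
      by_cases hfa : failAt words i = true
      · rw [if_pos hfa] at hf
        obtain rfl : i = K := by simpa using hf
        exact ⟨le_refl _, h, hfa, fun j h1 h2 => absurd (by omega) (by omega : ¬ j < i)⟩
      · rw [if_neg hfa] at hf
        obtain ⟨h1, h2, h3, h4⟩ := ih (i+1) K (by omega) hf
        refine ⟨by omega, h2, h3, fun j hj1 hj2 => ?_⟩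
        by_cases hji : j = i
        · subst hji; simpa using hfa
        · exact h4 j (by omega) hj2
    · rw [dif_neg h] at hf; simp at hf

lemma findFail_eq_none (words : List String) :
    ∀ (c i : Nat), words.length ≤ i + c → findFail words i = none →
      ∀ j, i ≤ j → j < words.length → failAt words j = false := by
  intro c
  induction c with
  | zero => intro i hc _ j hj1 hj2; omega
  | succ c ih =>
    intro i hc hf j hj1 hj2
    rw [findFail] at hf
    by_cases h : i < words.length
    · rw [dif_pos h] at hf
      by_cases hfa : failAt words i = true
      · rw [if_pos hfa] at hf; simp at hf
      · rw [if_neg hfa] at hf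
        by_cases hji : j = i
        · subst hji; simpa using hfa
        · exact ih (i+1) (by omega) hf j (by omega) hj2
    · omega

-- A's player/turn counters after i completed turns
def counters (n : Int) : Nat → Int × Int
  | 0 => (1, 1)
  | k+1 =>
    let p := counters n k
    if n = p.1 then (1, p.2 + 1) else (p.1 + 1, p.2)

-- B's replay loop over range(k) computes the same counters
lemma foldl_counters (n : Int) (K : Nat) :
    (PySem.List.pyRange 0 (K : Int) 1).foldl
      (fun (pt : Int × Int) _ => if n = pt.1 then (1, pt.2 + 1) else (pt.1 + 1, pt.2))
      (1, 1) = counters n K := by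
  induction K with
  | zero => rfl
  | succ K ih =>
    have : ((K + 1 : Nat) : Int) = (K : Int) + 1 := by push_cast; ring
    rw [this, PySem.List.pyRange_one_succ_right (by positivity), List.foldl_append, ih]
    rfl

-- string indexing bridges
lemma strGet0 (s : String) : PySem.Str.pyGet? s 0 = s.toList.head? := by
  rw [PySem.Str.pyGet?_eq]
  cases hl : s.toList with
  | nil => simp [PySem.List.pyGet?, PySem.List.pyIdx?]
  | cons c t => show PySem.List.pyGet? (c::t) 0 = _; simp [PySem.List.pyGet?, PySem.List.pyIdx?]

lemma strGetNeg1 (s : String) : PySem.Str.pyGet? s (-1) = s.toList.getLast? := by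
  rw [PySem.Str.pyGet?_eq]; exact PySem.List.pyGet?_neg_one s.toList

-- B's break condition at a Nat index k ≥ 1 is exactly failAt's first disjunct
lemma altBreakCond_eq (words : List String) (k : Nat) (hk : 1 ≤ k) :
    altBreakCond words (k : Int) =
      (match (words.getD k "").toList.head?, (words.getD (k-1) "").toList.getLast? with
       | some a, some b => a != b
       | _, _ => false) := by
  unfold altBreakCond
  have h1 : ((k : Int) - 1) = ((k - 1 : Nat) : Int) := by omega
  rw [h1, PySem.List.pyGetD_natCast, PySem.List.pyGetD_natCast, strGet0, strGetNeg1]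

-- characterization of the dup-collecting fold of B
lemma dupFold (ws : List String) :
    ∀ (pre : List String) (d : PySem.Dict String Int) (acc : List Int) (x : Int),
    (∀ w, d.contains w = pre.contains w) →
    (x ∈ ((PySem.List.enumerate ws (pre.length : Int)).foldl
        (fun (st : PySem.Dict String Int × List Int) p =>
          if st.1.contains p.2 then (st.1, st.2 ++ [p.1]) else (st.1.insert p.2 p.1, st.2))
        (d, acc)).2
      ↔ x ∈ acc ∨ ∃ j : Nat, j < ws.length ∧ x = ((pre.length + j : Nat) : Int) ∧
          (pre ++ ws.take j).contains (ws.getD j "") = true) := by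
  induction ws with
  | nil => intro pre d acc x _; simp [PySem.List.enumerate]
  | cons w t ih =>
    intro pre d acc x hd
    rw [PySem.List.enumerate_cons, List.foldl_cons]
    have hlen : ((pre.length : Int) + 1) = (((pre ++ [w]).length : Nat) : Int) := by
      simp
    by_cases hc : d.contains w = true
    · rw [if_pos hc]
      rw [hlen, ih (pre ++ [w]) d (acc ++ [(pre.length : Int)]) x
        (by intro w'; rw [hd w']
            simp only [List.contains_append]
            have : w ∈ pre := by
              have := hd w; rw [hc] at this
              simpa using this.symm
            by_cases hww : w' = w
            · subst hww; simpa using this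
            · simp [hww])]
      constructor
      · rintro (hx | ⟨j, hj1, hj2, hj3⟩)
        · rw [List.mem_append] at hx
          rcases hx with hx | hx
          · exact Or.inl hx
          · refine Or.inr ⟨0, by simp, by simpa using hx, ?_⟩
            have : w ∈ pre := by
              have := hd w; rw [hc] at this; simpa using this.symm
            simp [this]
        · refine Or.inr ⟨j + 1, by simpa using hj1, by simp at hj2 ⊢; omega, ?_⟩
          have : pre ++ (w :: t).take (j+1) = (pre ++ [w]) ++ t.take j := by simp
          rw [this]
          simpa using hj3
      · rintro (hx | ⟨j, hj1, hj2, hj3⟩)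
        · exact Or.inl (by simp [hx])
        · cases j with
          | zero =>
            refine Or.inl ?_
            simp at hj2
            simp [hj2]
          | succ j =>
            refine Or.inr ⟨j, by simp at hj1; omega, by simp at hj2 ⊢; omega, ?_⟩
            have : pre ++ (w :: t).take (j+1) = (pre ++ [w]) ++ t.take j := by simp
            rw [this] at hj3
            simpa using hj3
    · rw [if_neg hc]
      rw [hlen, ih (pre ++ [w]) (d.insert w (pre.length : Int)) acc x
        (by intro w'
            rw [PySem.Dict.contains_insert, hd w']
            by_cases hww : w' = w
            · subst hww; simp
            · simp [hww])]
      constructor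
      · rintro (hx | ⟨j, hj1, hj2, hj3⟩)
        · exact Or.inl hx
        · refine Or.inr ⟨j + 1, by simpa using hj1, by simp at hj2 ⊢; omega, ?_⟩
          have : pre ++ (w :: t).take (j+1) = (pre ++ [w]) ++ t.take j := by simp
          rw [this]; simpa using hj3
      · rintro (hx | ⟨j, hj1, hj2, hj3⟩)
        · exact Or.inl hx
        · cases j with
          | zero =>
            exfalso
            simp at hj3
            have hcw : d.contains w = true := by
              rw [hd w]; simpa [List.contains_iff_mem] using hj3
            exact hc hcw
          | succ j =>
            refine Or.inr ⟨j, by simp at hj1; omega, by simp at hj2 ⊢; omega, ?_⟩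
            have : pre ++ (w :: t).take (j+1) = (pre ++ [w]) ++ t.take j := by simp
            rw [this] at hj3
            simpa using hj3

-- membership in B's candidate list is exactly "a failing index"
lemma mem_candidates (words : List String) (x : Int) :
    (x ∈ (PySem.List.pyRange 1 (words.length : Int) 1).filter (altBreakCond words) ++
      ((PySem.List.enumerate words).foldl
        (fun (st : PySem.Dict String Int × List Int) p =>
          if st.1.contains p.2 then (st.1, st.2 ++ [p.1]) else (st.1.insert p.2 p.1, st.2))
        (PySem.Dict.empty, [])).2)
    ↔ ∃ k : Nat, x = (k : Int) ∧ 1 ≤ k ∧ k < words.length ∧ failAt words k = true := by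
  rw [List.mem_append, List.mem_filter, PySem.List.mem_pyRange_one]
  have henum : PySem.List.enumerate words = PySem.List.enumerate words (([] : List String).length : Int) := by
    simp
  rw [henum, dupFold words [] PySem.Dict.empty [] x (by intro w; simp [PySem.Dict.contains_empty])]
  constructor
  · rintro (⟨⟨h1, h2⟩, h3⟩ | (h | ⟨j, hj1, hj2, hj3⟩))
    · refine ⟨x.toNat, by omega, by omega, by omega, ?_⟩
      unfold failAt
      have hx : ((x.toNat : Nat) : Int) = x := by omega
      rw [← hx] at h3
      rw [altBreakCond_eq words x.toNat (by omega)] at h3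
      rw [h3]; simp
    · simp at h
    · simp only [List.nil_append] at hj3
      cases j with
      | zero => simp at hj3
      | succ j =>
        refine ⟨j + 1, by simpa using hj2, by omega, hj1, ?_⟩
        unfold failAt
        rw [hj3]; simp
  · rintro ⟨k, rfl, hk1, hk2, hfail⟩
    unfold failAt at hfail
    rcases Bool.or_eq_true_iff.mp hfail with hbr | hdup
    · exact Or.inl ⟨⟨by omega, by omega⟩, by rw [altBreakCond_eq words k hk1]; exact hbr⟩
    · exact Or.inr (Or.inr ⟨k, hk2, by simp, by simpa using hdup⟩)

-- B computes the reference: replayed counters at the least failing index (or [0,0]); any n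
lemma B_eq (n : Int) (words : List String) :
    solution_alt n words =
      match findFail words 1 with
      | some K => [(counters n K).1, (counters n K).2]
      | none => [0, 0] := by
  unfold solution_alt
  simp only []
  set cands := (PySem.List.pyRange 1 ((words.length : Nat) : Int) 1).filter (altBreakCond words) ++
      ((PySem.List.enumerate words).foldl
        (fun (st : PySem.Dict String Int × List Int) p =>
          if st.1.contains p.2 then (st.1, st.2 ++ [p.1]) else (st.1.insert p.2 p.1, st.2))
        (PySem.Dict.empty, [])).2 with hcands
  have hmem : ∀ x, x ∈ cands ↔ ∃ k : Nat, x = (k : Int) ∧ 1 ≤ k ∧ k < words.length ∧ failAt words k = true := by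
    intro x; rw [hcands]; exact mem_candidates words x
  cases hff : findFail words 1 with
  | none =>
    have hnone := findFail_eq_none words words.length 1 (by omega) hff
    have hnil : cands = [] := by
      rw [List.eq_nil_iff_forall_not_mem]
      intro x hx
      obtain ⟨k, _, hk1, hk2, hfail⟩ := (hmem x).mp hx
      rw [hnone k hk1 hk2] at hfail
      simp at hfail
    rw [if_pos hnil]
  | some K =>
    obtain ⟨hK1, hK2, hKfail, hKmin⟩ := findFail_eq_some words words.length 1 K (by omega) hff
    have hKmem : (K : Int) ∈ cands := (hmem _).mpr ⟨K, rfl, hK1, hK2, hKfail⟩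
    have hne : cands ≠ [] := fun h => by rw [h] at hKmem; simp at hKmem
    rw [if_neg hne]
    cases hmin : PySem.List.min? cands (fun x => x) with
    | none => exact absurd ((PySem.List.min?_eq_none_iff cands (fun x => x)).mp hmin) hne
    | some v =>
      have hv : v = (K : Int) := by
        obtain ⟨k, rfl, hk1, hk2, hkfail⟩ := (hmem v).mp (PySem.List.min?_mem hmin)
        have h1 : (k : Int) ≤ (K : Int) := PySem.List.min?_isMin hmin _ hKmem
        have h2 : K ≤ k := by
          by_contra h
          push_neg at h
          rw [hKmin k hk1 h] at hkfail
          simp at hkfail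
        omega
      rw [hv]
      simp only []  -- iota-reduce the match on 'some (K : Int)'
      rw [foldl_counters n K]

-- A's loop from index i ≥ 1, with the counters of i completed turns, computes the reference
lemma loopA (n : Int) (words : List String)
    (hne : ∀ w ∈ words, w ≠ "") :
    ∀ (c i : Nat), words.length ≤ i + c → 1 ≤ i →
    ∀ (used : List String) (last : Char),
    (∀ w, used.contains w = (words.take i).contains w) →
    (words.getD (i-1) "").toList.getLast? = some last →
    solutionLoop n words i (counters n i).1 (counters n i).2 used last =
      match findFail words i with
      | some K => [(counters n K).1, (counters n K).2]
      | none => [0, 0] := by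
  intro c
  induction c with
  | zero =>
    intro i hc hi used last _ _
    rw [solutionLoop, dif_neg (by omega), findFail, dif_neg (by omega)]
  | succ c ih =>
    intro i hc hi used last hu hl
    rw [solutionLoop, findFail]
    by_cases h : i < words.length
    · rw [dif_pos h, dif_pos h, if_pos (by omega : i ≠ 0)]
      have hgd : words.getD i "" = words[i] := List.getD_eq_getElem words "" h
      have hwne : words[i].toList ≠ [] := by
        have := hne words[i] (List.getElem_mem h)
        simpa using this
      obtain ⟨first, hfirst⟩ : ∃ f, words[i].toList.head? = some f := by
        cases hh : words[i].toList.head? with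
        | none => exact absurd (List.head?_eq_none_iff.mp hh) hwne
        | some a => exact ⟨a, rfl⟩
      rw [strGet0, hfirst]
      simp only []  -- iota-reduce the match on 'some first'
      have hfailAt : failAt words i =
          ((first != last) || (words.take i).contains words[i]) := by
        unfold failAt
        rw [hgd, hfirst, hl]
      by_cases hbr : last ≠ first
      · rw [if_pos hbr]
        have : failAt words i = true := by
          rw [hfailAt]; simp [bne, Ne.symm hbr]
        rw [if_pos this]
      · push_neg at hbr
        subst hbr
        rw [if_neg (by simp)]
        by_cases hmem : used.contains words[i] = true
        · rw [if_neg (by simpa using hmem)]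
          have : failAt words i = true := by
            rw [hfailAt, ← hu words[i], hmem]; simp
          rw [if_pos this]
        · rw [if_pos (by simpa using hmem)]
          have hfa : failAt words i = false := by
            rw [hfailAt, ← hu words[i]]
            simpa using hmem
          rw [if_neg (by simp [hfa])]
          obtain ⟨l, hlast'⟩ : ∃ l, words[i].toList.getLast? = some l := by
            cases hh : words[i].toList.getLast? with
            | none => exact absurd (List.getLast?_eq_none_iff.mp hh) hwne
            | some a => exact ⟨a, rfl⟩
          rw [strGetNeg1, hlast']
          simp only []  -- iota-reduce the match on 'some l'
          have hu' : ∀ w, (used ++ [words[i]]).contains w = (words.take (i+1)).contains w := by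
            intro w
            rw [List.take_succ]
            simp only [List.contains_append, hu w]
            congr 1
            simp [List.getElem?_eq_getElem h]
          have hl' : (words.getD (i+1-1) "").toList.getLast? = some l := by
            simp only [Nat.add_sub_cancel, hgd]
            exact hlast'
          have hrec := ih (i+1) (by omega) (by omega) (used ++ [words[i]]) l hu' hl'
          by_cases hcase : n = (counters n i).1
          · rw [if_pos hcase]
            have hc1 : counters n (i+1) = (1, (counters n i).2 + 1) := by
              show (let p := counters n i; if n = p.1 then ((1:Int), p.2 + 1) else (p.1 + 1, p.2)) = _
              simp only []
              rw [if_pos hcase]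
            rw [hc1] at hrec
            exact hrec
          · rw [if_neg hcase]
            have hc1 : counters n (i+1) = ((counters n i).1 + 1, (counters n i).2) := by
              show (let p := counters n i; if n = p.1 then ((1:Int), p.2 + 1) else (p.1 + 1, p.2)) = _
              simp only []
              rw [if_neg hcase]
            rw [hc1] at hrec
            exact hrec
    · rw [dif_neg h, dif_neg h]

-- ===== VERDICT (by name: the statement is the Claim_ definition above) =====
theorem solution_spec : Claim_equal_solution := by
  intro n words _hdom hpre
  obtain ⟨hwnil, hne⟩ := hpre
  show solution n words = solution_alt n words
  rw [B_eq n words]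
  cases words with
  | nil => exact absurd rfl hwnil
  | cons w0 rest =>
    simp only [solution]
    have hw0 : w0.toList ≠ [] := by
      have := hne w0 (by simp)
      simpa using this
    obtain ⟨l0, hl0⟩ : ∃ l, w0.toList.getLast? = some l := by
      cases hh : w0.toList.getLast? with
      | none => exact absurd (List.getLast?_eq_none_iff.mp hh) hw0
      | some a => exact ⟨a, rfl⟩
    rw [strGetNeg1, hl0]
    simp only []  -- iota-reduce the match on 'some l0'
    rw [solutionLoop]
    rw [dif_pos (by simp : 0 < (w0 :: rest).length)]
    rw [if_neg (by simp : ¬ (0 : Nat) ≠ 0)]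
    have key := loopA n (w0 :: rest) hne (w0 :: rest).length 1 (by omega) (le_refl 1)
      [w0] l0 (by intro w; simp [List.contains_cons]) (by simpa using hl0)
    by_cases hcase : n = 1
    · subst hcase
      rw [if_pos rfl]
      have hc1 : counters 1 1 = (1, 2) := by simp [counters]
      rw [hc1] at key
      exact key
    · rw [if_neg hcase]
      have hc1 : counters n 1 = (2, 1) := by simp [counters, hcase]
      rw [hc1] at key
      exact key
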